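-- pv_equiv track=rewrite | github.com/piotrbrendan/Advent_of_code_2018 | 2018_2.py | cnt_check
-- ===== SOURCE A (Python) =====
-- from collections import defaultdict
--
-- def cnt_check(id):
--
--     #check cnt is a list of counts of pairs and trios
--     check_cnt = [0,0]
--     cnt_dct = defaultdict(int)
--     for letter in id:
--         cnt_dct[letter] += 1
--
--     vals = set(cnt_dct.values())
--     if 2 in vals:
--         check_cnt[0] += 1
--     if 3 in vals:
--         check_cnt[1] += 1
--
--     return check_cnt
-- ===== SOURCE B (Python) =====
-- def cnt_check(id):
--     distinct = set(id)
--     return [1 if any(id.count(c) == 2 for c in distinct) else 0,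
--             1 if any(id.count(c) == 3 for c in distinct) else 0]
-- ===== Notes on version B (the rewrite author's own statement) =====
-- stated objective: simpler
-- what changed: Replaces the defaultdict counting pass plus set-of-values membership test with a repeated-scan approach: for each distinct character (set(id)) test id.count(c) == 2/3 directly, no dictionary built.
import Mathlib
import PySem

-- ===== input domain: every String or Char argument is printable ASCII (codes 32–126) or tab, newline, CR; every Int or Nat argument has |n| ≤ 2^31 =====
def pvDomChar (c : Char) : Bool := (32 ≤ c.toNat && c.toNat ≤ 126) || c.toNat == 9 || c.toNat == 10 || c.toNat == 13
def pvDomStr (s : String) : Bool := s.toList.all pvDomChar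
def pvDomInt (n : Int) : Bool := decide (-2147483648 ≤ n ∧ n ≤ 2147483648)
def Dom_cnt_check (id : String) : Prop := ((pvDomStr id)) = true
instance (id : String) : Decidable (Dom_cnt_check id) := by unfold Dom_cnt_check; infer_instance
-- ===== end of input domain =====

-- B replaces the defaultdict counting pass with per-distinct-character id.count scans (simpler decomposition, same result).


-- ===== PORT A =====
def cnt_check (id : String) : List Int :=
  let cnt_dct := id.toList.foldl (fun d letter => d.modify letter 0 (· + 1)) PySem.Dict.empty
  let vals : PySem.Set Int := PySem.Set.ofList cnt_dct.values
  let c0 : Int := if PySem.Set.contains vals 2 then 0 + 1 else 0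
  let c1 : Int := if PySem.Set.contains vals 3 then 0 + 1 else 0
  [c0, c1]

-- ===== PORT B =====
def cnt_check_alt (id : String) : List Int :=
  let l := id.toList
  let distinct := PySem.Set.ofList l
  [if distinct.any (fun c => (PySem.List.count l c : Int) == 2) then 1 else 0,
   if distinct.any (fun c => (PySem.List.count l c : Int) == 3) then 1 else 0]

-- ===== PRECONDITION & SPEC =====
def Spec_cnt_check (id : String) (out : List Int) : Prop := out = cnt_check_alt id
instance (id : String) (out : List Int) : Decidable (Spec_cnt_check id out) := by unfold Spec_cnt_check; infer_instance

-- ===== CLAIM (what is proved, stated in full; the proofs are below) =====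
def Claim_equal_cnt_check : Prop := ∀ (id : String), Dom_cnt_check id → Spec_cnt_check id (cnt_check id)

-- ===== LEMMAS AND PROOFS =====

-- ===== VERDICT (by name: the statement is the Claim_ definition above) =====
theorem cnt_check_spec : Claim_equal_cnt_check := by
  intro id _
  unfold Spec_cnt_check cnt_check cnt_check_alt
  rw [show (id.toList.foldl (fun d letter => d.modify letter 0 (· + 1)) PySem.Dict.empty) = PySem.Dict.counter id.toList from rfl]
  have hv : (PySem.Dict.counter id.toList).values
      = (PySem.Set.ofList id.toList).map (fun k => (List.count k id.toList : Int)) := by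
    have := PySem.Dict.items_counter (id.toList)
    simpa [PySem.Dict.values] using congrArg (List.map Prod.snd) this
  simp only [hv]
  have key : ∀ m : Int,
      PySem.Set.contains (PySem.Set.ofList ((PySem.Set.ofList id.toList).map (fun k => (List.count k id.toList : Int)))) m
      = (PySem.Set.ofList id.toList).any (fun c => (PySem.List.count id.toList c : Int) == m) := by
    intro m
    rw [Bool.eq_iff_iff]
    simp only [PySem.Set.contains_eq_listContains, List.contains_iff_mem, PySem.Set.mem_ofList,
      List.mem_map, List.any_eq_true, PySem.List.count_eq, beq_iff_eq]
  rw [key, key]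
  norm_num
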